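-- pv_equiv track=rewrite | github.com/MrBrantCode/unitest_baseline | mut_generate/mist_train_cf/cf_44639/solution.py | count_char_except_brackets
-- ===== SOURCE A (Python) =====
-- def count_char_except_brackets(string, char):
--     count = 0
--     ignore = False
--     for c in string:
--         if c in '([':
--             ignore = True
--         elif c in ')]':
--             ignore = False
--         elif not ignore and c == char:
--             count += 1
--     return count
-- ===== SOURCE B (Python) =====
-- def count_char_except_brackets(string, char):
--     # Jump-based scan: normalize brackets, then repeatedly cut the string at the
--     # next open bracket with str.partition, counting only in the visible part and
--     # skipping to just past the next close bracket.
--     if char in ('(', ')', '[', ']'):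
--         return 0
--     count = 0
--     rest = string.replace('[', '(').replace(']', ')')
--     while rest:
--         visible, bracket, rest = rest.partition('(')
--         count += sum(1 for c in visible if c == char)
--         if bracket:
--             _, _, rest = rest.partition(')')
--     return count
-- ===== Notes on version B (the rewrite author's own statement) =====
-- stated objective: faster
-- what changed: Replaces A's per-character toggle (ignore flag) state machine with a jump-based scan: normalize '[' / ']' to '(' / ')', then repeatedly str.partition at the next open bracket, count the character only in the visible prefix, and skip past the next close bracket; bracket characters are answered up front with 0.
import Mathlib
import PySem

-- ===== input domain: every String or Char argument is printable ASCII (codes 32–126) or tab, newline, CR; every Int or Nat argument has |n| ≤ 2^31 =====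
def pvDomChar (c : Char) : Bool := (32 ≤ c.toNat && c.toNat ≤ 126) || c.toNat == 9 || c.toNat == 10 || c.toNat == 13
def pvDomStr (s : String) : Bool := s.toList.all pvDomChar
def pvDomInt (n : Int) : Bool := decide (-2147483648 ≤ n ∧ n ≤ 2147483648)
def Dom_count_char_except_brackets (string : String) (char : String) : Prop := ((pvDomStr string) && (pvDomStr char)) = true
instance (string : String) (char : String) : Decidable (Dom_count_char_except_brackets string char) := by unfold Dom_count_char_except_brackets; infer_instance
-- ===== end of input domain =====

-- B replaces A's per-character toggle state machine by a jump-based scan (normalize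
-- brackets, then repeatedly str.partition at the next '(' and skip past the next ')'):
-- a different traversal with no ignore flag; a timing run measured B faster (constant factor).

-- ===== PORT A =====
-- one step of A's for-loop; Python's `c == char` (1-char string vs str) is [c] = char.toList
def aStep (char : String) (st : Int × Bool) (c : Char) : Int × Bool :=
  if c = '(' ∨ c = '[' then (st.1, true)
  else if c = ')' ∨ c = ']' then (st.1, false)
  else if st.2 = false ∧ [c] = char.toList then (st.1 + 1, st.2)
  else st

def count_char_except_brackets (string : String) (char : String) : Int :=
  (string.toList.foldl (aStep char) (0, false)).1

-- ===== PORT B =====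
-- hand port of Python's str.partition(sep) for a ONE-character separator (PySem has no
-- partition): (before first sep, [sep] or [] if absent, after); exact for len(sep) = 1.
def pyPartition (sep : Char) : List Char → List Char × List Char × List Char
  | [] => ([], [], [])
  | c :: cs =>
    if c = sep then ([], [sep], cs)
    else
      let p := pyPartition sep cs
      (c :: p.1, p.2.1, p.2.2)

theorem pyPartition_split (sep : Char) (cs : List Char) :
    (pyPartition sep cs).1.length + (pyPartition sep cs).2.1.length
      + (pyPartition sep cs).2.2.length = cs.length := by
  induction cs with
  | nil => simp [pyPartition]
  | cons c cs ih =>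
    by_cases h : c = sep <;> simp [pyPartition, h] <;> omega

theorem pyPartition_after_le (sep : Char) (cs : List Char) :
    (pyPartition sep cs).2.2.length ≤ cs.length := by
  have := pyPartition_split sep cs; omega

-- B's while loop: cut at the next '(' , count in the visible part, skip past the next ')'.
-- When no '(' is found, partition leaves rest = '' and the Python loop exits: return cnt.
def bLoop (pred : Char → Bool) (rest : List Char) : Int :=
  if rest = [] then 0
  else
    if (pyPartition '(' rest).2.1 = [] then
      ((pyPartition '(' rest).1.countP pred : Int)
    else
      ((pyPartition '(' rest).1.countP pred : Int)
        + bLoop pred (pyPartition ')' (pyPartition '(' rest).2.2).2.2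
termination_by rest.length
decreasing_by
  have h1 := pyPartition_after_le ')' (pyPartition '(' rest).2.2
  have h2 := pyPartition_split '(' rest
  have h3 : 0 < (pyPartition '(' rest).2.1.length := List.length_pos_of_ne_nil (by assumption)
  omega

def count_char_except_brackets_alt (string : String) (char : String) : Int :=
  if char = "(" ∨ char = ")" ∨ char = "[" ∨ char = "]" then 0
  else
    bLoop (fun c => decide ([c] = char.toList))
      (PySem.Str.replace (PySem.Str.replace string "[" "(") "]" ")").toList

-- ===== PRECONDITION & SPEC =====
def Spec_count_char_except_brackets (string : String) (char : String) (out : Int) : Prop := out = count_char_except_brackets_alt string char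
instance (string : String) (char : String) (out : Int) : Decidable (Spec_count_char_except_brackets string char out) := by unfold Spec_count_char_except_brackets; infer_instance

-- ===== CLAIM (what is proved, stated in full; the proofs are below) =====
def Claim_equal_count_char_except_brackets : Prop := ∀ (string : String) (char : String), Dom_count_char_except_brackets string char → Spec_count_char_except_brackets string char (count_char_except_brackets string char)

-- ===== LEMMAS AND PROOFS =====

-- normalization map performed by the two replaces in B
def normf (c : Char) : Char := if c = '[' then '(' else if c = ']' then ')' else c

theorem replace_go_single (b r : Char) :
    ∀ (fuel : Nat) (l acc : List Char), l.length ≤ fuel →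
      PySem.Chars.replace.go [b] [r] fuel l acc
        = acc.reverse ++ l.map (fun c => if c = b then r else c) := by
  intro fuel
  induction fuel with
  | zero =>
    intro l acc h
    have hl : l = [] := by cases l <;> simp_all
    subst hl; simp [PySem.Chars.replace.go]
  | succ n ih =>
    intro l acc h
    cases l with
    | nil => simp [PySem.Chars.replace.go]
    | cons c t =>
      by_cases hc : c = b
      · subst hc
        have hp : [c].isPrefixOf (c :: t) = true := by simp [List.isPrefixOf]
        simp only [PySem.Chars.replace.go, hp, if_pos]
        rw [ih _ _ (by simpa using Nat.le_of_succ_le_succ h)]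
        simp
      · have hp : [b].isPrefixOf (c :: t) = false := by
          simp [List.isPrefixOf]; exact fun h => absurd h.symm hc
        simp only [PySem.Chars.replace.go, hp]
        rw [if_neg (by simp)]
        rw [ih _ _ (by simpa using Nat.le_of_succ_le_succ h)]
        simp [hc]

theorem replace_single_char (b r : Char) (l : List Char) :
    PySem.Chars.replace l [b] [r] = l.map (fun c => if c = b then r else c) := by
  have := replace_go_single b r l.length l [] (le_refl _)
  simpa [PySem.Chars.replace] using this

theorem replace_chain (s : String) :
    (PySem.Str.replace (PySem.Str.replace s "[" "(") "]" ")").toList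
      = s.toList.map normf := by
  simp [PySem.Str.toList_replace, replace_single_char, List.map_map]
  intro c _
  by_cases h1 : c = '[' <;> by_cases h2 : c = ']' <;> simp_all [normf]

theorem foldl_map_normf (char : String) (cs : List Char) (st : Int × Bool) :
    (cs.map normf).foldl (aStep char) st = cs.foldl (aStep char) st := by
  rw [List.foldl_map]
  apply PySem.List.foldl_congr_mem
  intro acc c _
  by_cases h1 : c = '[' <;> by_cases h2 : c = ']' <;> simp_all [normf, aStep]

theorem no_squares_map_normf (cs : List Char) :
    '[' ∉ cs.map normf ∧ ']' ∉ cs.map normf := by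
  constructor <;>
  · intro h
    obtain ⟨c, _, hc⟩ := List.mem_map.mp h
    by_cases h1 : c = '[' <;> by_cases h2 : c = ']' <;> simp_all [normf]

theorem aFold_bracket_char (char : String) (cs : List Char) (st : Int × Bool)
    (h : ∀ c : Char, [c] = char.toList → (c = '(' ∨ c = ')' ∨ c = '[' ∨ c = ']')) :
    (cs.foldl (aStep char) st).1 = st.1 := by
  induction cs generalizing st with
  | nil => rfl
  | cons c t ih =>
    simp only [List.foldl_cons]
    rw [ih]
    unfold aStep
    split_ifs with h1 h2 h3
    · rfl
    · rfl
    · rcases h c h3.2 with h4 | h4 | h4 | h4 <;> simp_all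
    · rfl

theorem pyPartition_after_sublist (sep : Char) (cs : List Char) :
    ∀ c ∈ (pyPartition sep cs).2.2, c ∈ cs := by
  induction cs with
  | nil => simp [pyPartition]
  | cons c t ih =>
    by_cases h : c = sep
    · simp [pyPartition, h]; intro x hx; exact Or.inr hx
    · simp only [pyPartition, if_neg h]
      intro x hx
      exact List.mem_cons_of_mem _ (ih x hx)

theorem pyPartition_cons_ne (sep c : Char) (t : List Char) (h : c ≠ sep) :
    pyPartition sep (c :: t) = (c :: (pyPartition sep t).1, (pyPartition sep t).2.1, (pyPartition sep t).2.2) := by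
  simp [pyPartition, h]

theorem bLoop_cons_of_ne (pred : Char → Bool) (c : Char) (tl : List Char) (hc : c ≠ '(') :
    bLoop pred (c :: tl) = (if pred c then 1 else 0) + bLoop pred tl := by
  rw [bLoop]
  simp only [reduceCtorEq, if_false, pyPartition_cons_ne '(' c tl hc]
  cases tl with
  | nil =>
    simp [bLoop, pyPartition, List.countP_cons]
  | cons d t =>
    conv_rhs => rw [bLoop]
    simp only [reduceCtorEq, if_false]
    by_cases hm : (pyPartition '(' (d :: t)).2.1 = [] <;>
      simp [hm, List.countP_cons] <;> cases h : pred c <;> simp [h] <;> try ring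

theorem aFold_ignore (char : String) (ns : List Char) (k : Int) (hs : ']' ∉ ns) :
    (ns.foldl (aStep char) (k, true)).1
      = (((pyPartition ')' ns).2.2).foldl (aStep char) (k, false)).1 := by
  induction ns generalizing k with
  | nil => simp [pyPartition]
  | cons c t ih =>
    have hs' : ']' ∉ t := fun h => hs (List.mem_cons_of_mem _ h)
    by_cases h1 : c = ')'
    · subst h1
      simp [pyPartition, aStep]
    · have hne : c ≠ ']' := fun h => hs (h ▸ List.mem_cons_self)
      rw [pyPartition_cons_ne ')' c t h1]
      simp only [List.foldl_cons]
      have hstep : aStep char (k, true) c = (k, true) := by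
        unfold aStep
        split_ifs with ha hb hc
        · rfl
        · rcases hb with hb | hb
          · exact absurd hb h1
          · exact absurd hb hne
        · exact absurd hc.1 (by simp)
        · rfl
      rw [hstep, ih k hs']

theorem aFold_eq_bLoop (char : String) (pred : Char → Bool)
    (hpred : ∀ c, pred c = true ↔ [c] = char.toList)
    (hpc : pred ')' = false) :
    ∀ n (ns : List Char), ns.length ≤ n → '[' ∉ ns → ']' ∉ ns →
      ∀ k : Int, (ns.foldl (aStep char) (k, false)).1 = k + bLoop pred ns := by
  intro n
  induction n with
  | zero =>
    intro ns h _ _ k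
    have : ns = [] := by cases ns <;> simp_all
    subst this; simp [bLoop]
  | succ n ih =>
    intro ns h hsq1 hsq2 k
    cases ns with
    | nil => simp [bLoop]
    | cons c t =>
      have ht1 : '[' ∉ t := fun hx => hsq1 (List.mem_cons_of_mem _ hx)
      have ht2 : ']' ∉ t := fun hx => hsq2 (List.mem_cons_of_mem _ hx)
      have hc1 : c ≠ '[' := fun hx => hsq1 (hx ▸ List.mem_cons_self)
      have hc2 : c ≠ ']' := fun hx => hsq2 (hx ▸ List.mem_cons_self)
      by_cases ho : c = '('
      · subst ho
        -- A enters the ignore state; B jumps past the next ')'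
        have hstep : aStep char (k, false) '(' = (k, true) := by simp [aStep]
        simp only [List.foldl_cons, hstep]
        rw [aFold_ignore char t k ht2]
        have hlen : ((pyPartition ')' t).2.2).length ≤ n := by
          have := pyPartition_after_le ')' t
          simp at h; omega
        have hmem := pyPartition_after_sublist ')' t
        rw [ih _ hlen (fun hx => ht1 (hmem _ hx)) (fun hx => ht2 (hmem _ hx)) k]
        conv_rhs => rw [bLoop]
        simp [pyPartition]
      · -- visible character (or a stray close): one step each side
        rw [bLoop_cons_of_ne pred c t ho]
        by_cases hcl : c = ')'
        · subst hcl
          have hstep : aStep char (k, false) ')' = (k, false) := by simp [aStep]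
          simp only [List.foldl_cons, hstep]
          rw [ih t (by simp at h; omega) ht1 ht2 k]
          simp [hpc]
        · by_cases hm : pred c = true
          · have hstep : aStep char (k, false) c = (k + 1, false) := by
              simp [aStep, ho, hc1, hcl, hc2, (hpred c).mp hm]
            simp only [List.foldl_cons, hstep]
            rw [ih t (by simp at h; omega) ht1 ht2 (k + 1)]
            simp [hm]; ring
          · have hstep : aStep char (k, false) c = (k, false) := by
              simp only [aStep]
              rw [if_neg (by simp [ho, hc1]), if_neg (by simp [hcl, hc2]), if_neg]
              intro hx
              exact hm ((hpred c).mpr hx.2)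
            simp only [List.foldl_cons, hstep]
            rw [ih t (by simp at h; omega) ht1 ht2 k]
            simp [hm]

-- ===== VERDICT (by name: the statement is the Claim_ definition above) =====
theorem count_char_except_brackets_spec : Claim_equal_count_char_except_brackets := by
  intro string char _
  unfold Spec_count_char_except_brackets count_char_except_brackets count_char_except_brackets_alt
  by_cases hbr : char = "(" ∨ char = ")" ∨ char = "[" ∨ char = "]"
  · rw [if_pos hbr]
    apply aFold_bracket_char
    intro c hc
    rcases hbr with h | h | h | h <;> subst h <;> simp_all
  · rw [if_neg hbr]
    push Not at hbr
    obtain ⟨h1, h2, h3, h4⟩ := hbr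
    rw [replace_chain]
    rw [← foldl_map_normf char string.toList (0, false)]
    obtain ⟨hq1, hq2⟩ := no_squares_map_normf string.toList
    have hpred : ∀ c, (fun c => decide ([c] = char.toList)) c = true ↔ [c] = char.toList := by
      intro c; simp
    have hpc : (fun c => decide ([c] = char.toList)) ')' = false := by
      simp only [decide_eq_false_iff_not]
      intro he
      exact h2 (String.toList_inj.mp (he.symm.trans (show [')'] = (")" : String).toList by decide)))
    have := aFold_eq_bLoop char _ hpred hpc (string.toList.map normf).length _ le_rfl hq1 hq2 0
    simpa using this
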